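-- pv_equiv track=rewrite | github.com/hackathon292-crypto/Unbiased-Ai-Decision | backend/utils/file_inspector.py | _detect_domain_from_keys
-- ===== SOURCE A (Python) =====
-- from typing import Any, Dict, List, Optional
--
-- DOMAIN_FIELDS: Dict[str, List[str]] = {
--     "hiring": [
--         "years_experience", "education_level", "technical_score",
--         "communication_score", "num_past_jobs", "certifications",
--         "gender", "religion", "ethnicity",
--     ],
--     "loan": [
--         "credit_score", "annual_income", "loan_amount", "loan_term_months",
--         "employment_years", "existing_debt", "num_credit_lines",
--         "gender", "age_group", "ethnicity",
--     ],
--     "social": [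
--         "avg_session_minutes", "posts_per_day", "topics_interacted",
--         "like_rate", "share_rate", "comment_rate", "account_age_days",
--         "gender", "age_group", "location", "language",
--     ],
-- }
--
-- def _normalize(name: str) -> str:
--     return str(name).strip().lower().replace("_", "").replace("-", "").replace(" ", "")
--
-- def _detect_domain_from_keys(keys: List[str]) -> Optional[str]:
--     normalized_keys = {_normalize(key) for key in keys}
--     best_domain = None
--     best_score = 0
--     for domain, fields in DOMAIN_FIELDS.items():
--         score = sum(1 for field in fields if _normalize(field) in normalized_keys)
--         if score > best_score:
--             best_score = score
--             best_domain = domain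
--     return best_domain if best_score >= 2 else None
-- ===== SOURCE B (Python) =====
-- from typing import Dict, List, Optional
--
-- DOMAIN_FIELDS: Dict[str, List[str]] = {
--     "hiring": [
--         "years_experience", "education_level", "technical_score",
--         "communication_score", "num_past_jobs", "certifications",
--         "gender", "religion", "ethnicity",
--     ],
--     "loan": [
--         "credit_score", "annual_income", "loan_amount", "loan_term_months",
--         "employment_years", "existing_debt", "num_credit_lines",
--         "gender", "age_group", "ethnicity",
--     ],
--     "social": [
--         "avg_session_minutes", "posts_per_day", "topics_interacted",
--         "like_rate", "share_rate", "comment_rate", "account_age_days",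
--         "gender", "age_group", "location", "language",
--     ],
-- }
--
-- def _normalize(name: str) -> str:
--     return str(name).strip().lower().replace("_", "").replace("-", "").replace(" ", "")
--
-- # Inverted index, built once: normalized field name -> domains containing it.
-- _INDEX: Dict[str, List[str]] = {}
-- for _domain, _fields in DOMAIN_FIELDS.items():
--     for _f in _fields:
--         _INDEX.setdefault(_normalize(_f), []).append(_domain)
--
-- def _detect_domain_from_keys(keys: List[str]) -> Optional[str]:
--     normalized_keys = {_normalize(key) for key in keys}
--     counts: Dict[str, int] = {}
--     for k in normalized_keys:
--         for dm in _INDEX.get(k, []):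
--             counts[dm] = counts.get(dm, 0) + 1
--     best = max(counts.get(d, 0) for d in DOMAIN_FIELDS)
--     if best < 2:
--         return None
--     return next(d for d in DOMAIN_FIELDS if counts.get(d, 0) == best)
-- ===== Notes on version B (the rewrite author's own statement) =====
-- stated objective: alternative
-- what changed: B builds an inverted index (normalized field name -> domains) once and fills a per-domain counter in a single pass over the normalized keys, then selects the first domain in DOMAIN_FIELDS order whose count equals the maximum, instead of A's per-domain rescan of every field list with a running best.
import Mathlib
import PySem

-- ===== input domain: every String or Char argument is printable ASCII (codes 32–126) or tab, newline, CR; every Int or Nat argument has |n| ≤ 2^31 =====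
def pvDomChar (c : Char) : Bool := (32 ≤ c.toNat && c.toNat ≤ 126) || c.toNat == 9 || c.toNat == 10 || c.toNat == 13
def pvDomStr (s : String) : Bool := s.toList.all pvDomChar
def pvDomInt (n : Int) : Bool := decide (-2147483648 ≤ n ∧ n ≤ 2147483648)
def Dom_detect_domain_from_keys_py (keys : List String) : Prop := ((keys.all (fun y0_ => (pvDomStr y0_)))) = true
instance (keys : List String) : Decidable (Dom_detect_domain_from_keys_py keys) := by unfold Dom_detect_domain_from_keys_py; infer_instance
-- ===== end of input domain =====

set_option maxRecDepth 16384

-- B replaces A's per-domain rescan of every field list by an inverted index (normalized field →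
-- domains) built once, a counter filled in one pass over the normalized keys, and a max /
-- first-argmax selection in DOMAIN_FIELDS order (objective: alternative; same tie-breaking).

-- ===== PORT A =====
-- shared module constant (Python dict DOMAIN_FIELDS, as an insertion-ordered association list)
def DOMAIN_FIELDS : List (String × List String) :=
  [("hiring", ["years_experience", "education_level", "technical_score",
               "communication_score", "num_past_jobs", "certifications",
               "gender", "religion", "ethnicity"]),
   ("loan", ["credit_score", "annual_income", "loan_amount", "loan_term_months",
             "employment_years", "existing_debt", "num_credit_lines",
             "gender", "age_group", "ethnicity"]),
   ("social", ["avg_session_minutes", "posts_per_day", "topics_interacted",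
               "like_rate", "share_rate", "comment_rate", "account_age_days",
               "gender", "age_group", "location", "language"])]

-- _normalize; str(name) on a str argument is the identity and is omitted
def normalizePy (s : String) : String :=
  PySem.Str.replace (PySem.Str.replace (PySem.Str.replace
    (PySem.Str.lower (PySem.Str.strip s)) "_" "") "-" "") " " ""

def detect_domain_from_keys_py (keys : List String) : Option String :=
  let normalized_keys : PySem.Set String := PySem.Set.ofList (keys.map normalizePy)
  let r := DOMAIN_FIELDS.foldl (fun (st : Option String × Int) df =>
    let score : Int :=
      (df.2.map (fun f => if PySem.Set.contains normalized_keys (normalizePy f)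
                          then (1 : Int) else 0)).sum
    if score > st.2 then (some df.1, score) else st) (none, (0 : Int))
  if r.2 ≥ 2 then r.1 else none

-- ===== PORT B =====
-- module-level inverted index _INDEX: normalized field name -> domains containing it
def invIndex : PySem.Dict String (List String) :=
  DOMAIN_FIELDS.foldl (fun d df =>
    df.2.foldl (fun d f => d.modify (normalizePy f) [] (fun l => l ++ [df.1])) d)
    PySem.Dict.empty

-- counts is only looked up afterwards, so consuming the Set's element list is order-independent;
-- Python's max(...) over the (statically nonempty) generator is maxD, next(...) (whose witness
-- statically exists when reached) is find?.
def detect_domain_from_keys_py_alt (keys : List String) : Option String :=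
  let normalized_keys : PySem.Set String := PySem.Set.ofList (keys.map normalizePy)
  let counts : PySem.Dict String Int :=
    normalized_keys.foldl
      (fun c k => (invIndex.getD k []).foldl (fun c dm => c.modify dm 0 (· + 1)) c)
      PySem.Dict.empty
  let best : Int := PySem.List.maxD (DOMAIN_FIELDS.map (fun df => counts.getD df.1 0)) (fun x => x) 0
  if best < 2 then none
  else (DOMAIN_FIELDS.map (fun df => df.1)).find? (fun dm => counts.getD dm 0 == best)

-- ===== PRECONDITION & SPEC =====
def Spec_detect_domain_from_keys_py (keys : List String) (out : Option String) : Prop := out = detect_domain_from_keys_py_alt keys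
instance (keys : List String) (out : Option String) : Decidable (Spec_detect_domain_from_keys_py keys out) := by unfold Spec_detect_domain_from_keys_py; infer_instance

-- ===== CLAIM (what is proved, stated in full; the proofs are below) =====
def Claim_equal_detect_domain_from_keys_py : Prop := ∀ (keys : List String), Dom_detect_domain_from_keys_py keys → Spec_detect_domain_from_keys_py keys (detect_domain_from_keys_py keys)

-- ===== LEMMAS AND PROOFS =====

-- the three normalized field lists, as literals
def NFh : List String := ["yearsexperience", "educationlevel", "technicalscore",
  "communicationscore", "numpastjobs", "certifications", "gender", "religion", "ethnicity"]
def NFl : List String := ["creditscore", "annualincome", "loanamount", "loantermmonths",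
  "employmentyears", "existingdebt", "numcreditlines", "gender", "agegroup", "ethnicity"]
def NFs : List String := ["avgsessionminutes", "postsperday", "topicsinteracted", "likerate",
  "sharerate", "commentrate", "accountagedays", "gender", "agegroup", "location", "language"]
def allIdxKeys : List String := NFh ++ NFl ++ NFs

lemma invIndex_eq : invIndex = PySem.Dict.mk
  [("yearsexperience", ["hiring"]), ("educationlevel", ["hiring"]), ("technicalscore", ["hiring"]),
   ("communicationscore", ["hiring"]), ("numpastjobs", ["hiring"]), ("certifications", ["hiring"]),
   ("gender", ["hiring", "loan", "social"]), ("religion", ["hiring"]), ("ethnicity", ["hiring", "loan"]),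
   ("creditscore", ["loan"]), ("annualincome", ["loan"]), ("loanamount", ["loan"]),
   ("loantermmonths", ["loan"]), ("employmentyears", ["loan"]), ("existingdebt", ["loan"]),
   ("numcreditlines", ["loan"]), ("agegroup", ["loan", "social"]),
   ("avgsessionminutes", ["social"]), ("postsperday", ["social"]), ("topicsinteracted", ["social"]),
   ("likerate", ["social"]), ("sharerate", ["social"]), ("commentrate", ["social"]),
   ("accountagedays", ["social"]), ("location", ["social"]), ("language", ["social"])] := by
  rfl

lemma idx_getD_of_not_mem {k : String} (hk : k ∉ allIdxKeys) : invIndex.getD k [] = [] := by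
  rw [invIndex_eq]
  simp only [PySem.Dict.getD_eq_get?_getD, PySem.Dict.get?]
  rw [List.find?_eq_none.2 ?_]
  · rfl
  · intro p hp
    fin_cases hp <;> simp <;> rintro rfl <;> exact hk (by decide)

lemma idx_count_h (k : String) :
    ((invIndex.getD k []).count "hiring" : Int) = if k ∈ NFh then 1 else 0 := by
  by_cases hk : k ∈ allIdxKeys
  · fin_cases hk <;> decide
  · rw [idx_getD_of_not_mem hk, if_neg (fun hm => hk (by fin_cases hm <;> decide))]
    simp

lemma idx_count_l (k : String) :
    ((invIndex.getD k []).count "loan" : Int) = if k ∈ NFl then 1 else 0 := by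
  by_cases hk : k ∈ allIdxKeys
  · fin_cases hk <;> decide
  · rw [idx_getD_of_not_mem hk, if_neg (fun hm => hk (by fin_cases hm <;> decide))]
    simp

lemma idx_count_s (k : String) :
    ((invIndex.getD k []).count "social" : Int) = if k ∈ NFs then 1 else 0 := by
  by_cases hk : k ∈ allIdxKeys
  · fin_cases hk <;> decide
  · rw [idx_getD_of_not_mem hk, if_neg (fun hm => hk (by fin_cases hm <;> decide))]
    simp

-- counting both ways round: for nodup lists, |{x ∈ l₁ : x ∈ l₂}| = |{x ∈ l₂ : x ∈ l₁}|
lemma countP_mem_comm {α : Type} [DecidableEq α] {l₁ l₂ : List α}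
    (h₁ : l₁.Nodup) (h₂ : l₂.Nodup) :
    l₁.countP (fun x => decide (x ∈ l₂)) = l₂.countP (fun x => decide (x ∈ l₁)) := by
  rw [List.countP_eq_length_filter, List.countP_eq_length_filter]
  apply List.Perm.length_eq
  rw [List.perm_ext_iff_of_nodup (h₁.filter _) (h₂.filter _)]
  intro a
  simp [List.mem_filter, and_comm]

-- the nested counting loop of B, characterised
lemma counts_getD (dm : String) : ∀ (S : List String) (c : PySem.Dict String Int),
    (S.foldl (fun c k => (invIndex.getD k []).foldl (fun c dm => c.modify dm 0 (· + 1)) c) c).getD dm 0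
      = c.getD dm 0 + (S.map (fun k => ((invIndex.getD k []).count dm : Int))).sum := by
  intro S
  induction S with
  | nil => intro c; simp
  | cons k ks ih =>
    intro c
    simp only [List.foldl_cons, List.map_cons, List.sum_cons]
    rw [ih, PySem.Dict.getD_foldl_modify_add_one]
    ring

-- B's count for a domain = countP of the normalized-key list
lemma counts_getD_countP (S : List String) (dm : String) (NF : List String)
    (hpt : ∀ k, ((invIndex.getD k []).count dm : Int) = if k ∈ NF then 1 else 0) :
    (S.foldl (fun c k => (invIndex.getD k []).foldl (fun c dm => c.modify dm 0 (· + 1)) c)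
        PySem.Dict.empty).getD dm 0
      = (S.countP (fun k => decide (k ∈ NF)) : Int) := by
  rw [counts_getD]
  simp only [hpt, PySem.Dict.getD_empty, zero_add]
  rw [← PySem.List.sum_map_ite_one_zero (fun k => decide (k ∈ NF)) S]
  simp

-- A's per-domain score = countP over the normalized field list
lemma score_countP (S : PySem.Set String) (fields : List String) (NF : List String)
    (hNF : fields.map normalizePy = NF) :
    ((fields.map (fun f => if PySem.Set.contains S (normalizePy f) then (1 : Int) else 0)).sum)
      = (NF.countP (fun x => decide (x ∈ S)) : Int) := by
  rw [PySem.List.sum_map_ite_one_zero (fun f => PySem.Set.contains S (normalizePy f)) fields]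
  congr 1
  rw [← hNF, List.countP_map]
  apply List.countP_congr
  intro x _
  simp [Function.comp, PySem.Set.contains_eq_listContains]

-- the two selection procedures, over the three scores
def selA (s1 s2 s3 : Int) : Option String :=
  let r := [("hiring", s1), ("loan", s2), ("social", s3)].foldl
    (fun (st : Option String × Int) p => if p.2 > st.2 then (some p.1, p.2) else st) (none, (0 : Int))
  if r.2 ≥ 2 then r.1 else none

def selB (c1 c2 c3 : Int) : Option String :=
  let best := PySem.List.maxD [c1, c2, c3] (fun x => x) 0
  if best < 2 then none
  else match c1 == best with
    | true => some "hiring"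
    | false => match c2 == best with
      | true => some "loan"
      | false => match c3 == best with
        | true => some "social"
        | false => none

lemma maxD3 (s1 s2 s3 : Int) : PySem.List.maxD [s1, s2, s3] (fun x => x) 0 = max (max s1 s2) s3 := by
  simp only [PySem.List.maxD, PySem.List.max?, List.foldl_cons, List.foldl_nil]
  split_ifs with h1 <;> dsimp only <;> split_ifs <;> simp only [Option.getD_some] <;> omega

lemma sel_eq (s1 s2 s3 : Int) (h1 : 0 ≤ s1) (h2 : 0 ≤ s2) (h3 : 0 ≤ s3) :
    selA s1 s2 s3 = selB s1 s2 s3 := by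
  simp only [selA, selB, List.foldl_cons, List.foldl_nil, maxD3]
  cases e1 : (s1 == max (max s1 s2) s3) <;> cases e2 : (s2 == max (max s1 s2) s3) <;>
    cases e3 : (s3 == max (max s1 s2) s3) <;>
    simp only [e1, e2, e3] <;>
    simp only [beq_iff_eq, beq_eq_false_iff_ne] at e1 e2 e3 <;>
    split_ifs <;> (try dsimp only) <;> first | rfl | omega

-- the ports, expressed through selA/selB
lemma A_shape (keys : List String) :
    detect_domain_from_keys_py keys =
      selA ((("years_experience" :: DOMAIN_FIELDS.headI.2.tail).map
              (fun f => if PySem.Set.contains (PySem.Set.ofList (keys.map normalizePy)) (normalizePy f)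
                        then (1 : Int) else 0)).sum)
           (((DOMAIN_FIELDS.tail.headI.2).map
              (fun f => if PySem.Set.contains (PySem.Set.ofList (keys.map normalizePy)) (normalizePy f)
                        then (1 : Int) else 0)).sum)
           (((DOMAIN_FIELDS.tail.tail.headI.2).map
              (fun f => if PySem.Set.contains (PySem.Set.ofList (keys.map normalizePy)) (normalizePy f)
                        then (1 : Int) else 0)).sum) := by
  rfl

lemma B_shape (keys : List String) :
    detect_domain_from_keys_py_alt keys =
      selB (((PySem.Set.ofList (keys.map normalizePy) : List String).foldl
              (fun c k => (invIndex.getD k []).foldl (fun c dm => c.modify dm 0 (· + 1)) c)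
              PySem.Dict.empty).getD "hiring" 0)
           (((PySem.Set.ofList (keys.map normalizePy) : List String).foldl
              (fun c k => (invIndex.getD k []).foldl (fun c dm => c.modify dm 0 (· + 1)) c)
              PySem.Dict.empty).getD "loan" 0)
           (((PySem.Set.ofList (keys.map normalizePy) : List String).foldl
              (fun c k => (invIndex.getD k []).foldl (fun c dm => c.modify dm 0 (· + 1)) c)
              PySem.Dict.empty).getD "social" 0) := by
  rfl

theorem detect_eq (keys : List String) :
    detect_domain_from_keys_py keys = detect_domain_from_keys_py_alt keys := by
  have hnd : (PySem.Set.ofList (keys.map normalizePy) : List String).Nodup :=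
    PySem.Set.nodup_ofList _
  rw [A_shape, B_shape]
  rw [score_countP _ _ NFh (by decide), score_countP _ _ NFl (by decide),
      score_countP _ _ NFs (by decide)]
  rw [counts_getD_countP _ _ NFh idx_count_h, counts_getD_countP _ _ NFl idx_count_l,
      counts_getD_countP _ _ NFs idx_count_s]
  rw [countP_mem_comm (by decide : NFh.Nodup) hnd, countP_mem_comm (by decide : NFl.Nodup) hnd,
      countP_mem_comm (by decide : NFs.Nodup) hnd]
  exact sel_eq _ _ _ (Int.natCast_nonneg _) (Int.natCast_nonneg _) (Int.natCast_nonneg _)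

-- ===== VERDICT (by name: the statement is the Claim_ definition above) =====
theorem detect_domain_from_keys_py_spec : Claim_equal_detect_domain_from_keys_py := by
  intro keys _
  unfold Spec_detect_domain_from_keys_py
  exact detect_eq keys
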